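-- pv_equiv track=rewrite | github.com/Lucas-Sturiao/Python-Dojo | Functions/ex002/main.py | soma_positivos
-- ===== SOURCE A (Python) =====
-- def soma_positivos(lista):
--     total = 0
--
--     for numero in lista:
--         if numero < 0:
--             continue
--         elif numero == 0:
--             break
--         else:
--             total += numero
--
--     return total
-- ===== SOURCE B (Python) =====
-- def soma_positivos(lista):
--     # Locate the first zero (the stopping point), then sum the prefix
--     # branch-free by clamping each element to max(n, 0).
--     try:
--         k = lista.index(0)
--     except ValueError:
--         k = len(lista)
--     return sum(max(n, 0) for n in lista[:k])
-- ===== Notes on version B (the rewrite author's own statement) =====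
-- stated objective: alternative
-- what changed: Instead of one conditional loop with continue/break, B first locates the first zero with list.index to cut the prefix, then sums that prefix branch-free via max(n, 0) clamping.
import Mathlib
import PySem

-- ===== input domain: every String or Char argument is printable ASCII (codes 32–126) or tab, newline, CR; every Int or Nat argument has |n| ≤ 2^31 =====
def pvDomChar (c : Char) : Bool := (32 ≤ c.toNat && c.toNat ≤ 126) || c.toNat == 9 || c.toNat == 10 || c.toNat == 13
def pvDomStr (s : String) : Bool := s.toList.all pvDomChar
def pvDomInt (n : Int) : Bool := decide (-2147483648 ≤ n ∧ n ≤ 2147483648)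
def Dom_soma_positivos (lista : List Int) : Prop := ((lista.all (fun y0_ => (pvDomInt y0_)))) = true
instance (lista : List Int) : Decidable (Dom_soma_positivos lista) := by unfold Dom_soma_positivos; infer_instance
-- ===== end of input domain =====

-- B replaces A's conditional continue/break loop by: find the first zero with list.index,
-- slice the prefix, and sum it branch-free with max(n, 0) clamping (alternative, same cost).

-- ===== PORT A =====
-- A's for-loop with continue/break, transliterated as structural recursion over the list
-- carrying the accumulator `total`; `break` returns the accumulator immediately.
def somaLoopA (total : Int) : List Int → Int
  | [] => total
  | numero :: rest =>
    if numero < 0 then somaLoopA total rest          -- continue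
    else if numero = 0 then total                    -- break
    else somaLoopA (total + numero) rest             -- total += numero

def soma_positivos (lista : List Int) : Int := somaLoopA 0 lista

-- ===== PORT B =====
-- k = lista.index(0) (or len(lista) on ValueError); sum(max(n, 0) for n in lista[:k])
def soma_positivos_alt (lista : List Int) : Int :=
  let k : Nat :=
    match PySem.List.index? lista 0 with
    | some k => k
    | none => lista.length
  ((PySem.List.slice lista none (some (k : Int))).map (fun n => max n 0)).sum

-- ===== PRECONDITION & SPEC =====
def Spec_soma_positivos (lista : List Int) (out : Int) : Prop := out = soma_positivos_alt lista
instance (lista : List Int) (out : Int) : Decidable (Spec_soma_positivos lista out) := by unfold Spec_soma_positivos; infer_instance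

-- ===== CLAIM (what is proved, stated in full; the proofs are below) =====
def Claim_equal_soma_positivos : Prop := ∀ (lista : List Int), Dom_soma_positivos lista → Spec_soma_positivos lista (soma_positivos lista)

-- ===== LEMMAS AND PROOFS =====
-- A's loop sums the clamped values of the prefix before the first zero.
theorem somaLoopA_eq (lista : List Int) : ∀ (total : Int),
    somaLoopA total lista =
      total + ((lista.takeWhile (fun x => x ≠ 0)).map (fun n => max n 0)).sum := by
  induction lista with
  | nil => intro total; simp [somaLoopA]
  | cons numero rest ih =>
    intro total
    by_cases hz : numero = 0
    · subst hz; simp [somaLoopA, List.takeWhile]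
    · by_cases hn : numero < 0
      · have hmax : max numero 0 = 0 := by omega
        simp [somaLoopA, hn, List.takeWhile, hz, ih, hmax]
      · have hmax : max numero 0 = numero := by omega
        simp only [somaLoopA, if_neg hn, if_neg hz, ih, List.takeWhile]
        simp [hz, hmax]
        ring

-- The prefix before the first zero, computed via index?, is the takeWhile prefix.
theorem take_firstZero_eq_takeWhile (lista : List Int) :
    lista.take (match PySem.List.index? lista 0 with
                | some k => k
                | none => lista.length)
      = lista.takeWhile (fun x => x ≠ 0) := by
  induction lista with
  | nil => simp
  | cons x rest ih =>
    by_cases hx : x = 0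
    · subst hx
      rw [PySem.List.index?_cons_self]
      simp [List.takeWhile]
    · rw [PySem.List.index?_cons_of_ne rest hx]
      cases h : PySem.List.index? rest 0 with
      | none =>
        rw [h] at ih
        simp only [Option.map_none]
        simp [List.takeWhile, hx, ih]
      | some k =>
        rw [h] at ih
        simp only [Option.map_some]
        simp [List.takeWhile, hx, ih]

-- ===== VERDICT (by name: the statement is the Claim_ definition above) =====
theorem soma_positivos_spec : Claim_equal_soma_positivos := by
  intro lista _
  unfold Spec_soma_positivos soma_positivos soma_positivos_alt
  simp only [PySem.List.slice_to_natCast, take_firstZero_eq_takeWhile]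
  simpa using somaLoopA_eq lista 0
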